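-- pv_equiv track=rewrite | github.com/KKM3657/Algorithm_Study | Needle/Needle.py | solution
-- ===== SOURCE A (Python) =====
-- def solution(U,M,L):
--     result = 0
--     for value1 in U:
--         for value2 in M:
--             k = value1 - value2
--             target = value2 - k
--             if is_target(target, L):
--               result += 1
--     return result
--
-- def is_target(target, L):
--     start = 0
--     end = len(L) - 1
--
--     while start <= end:
--         mid = (start + end) // 2
--
--         if L[mid] == target:
--             return True  # 함수를 끝내버린다.
--         elif L[mid] < target:
--             start = mid + 1
--         else:
--             end = mid - 1
--
--     return False
-- ===== SOURCE B (Python) =====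
-- def solution(U, M, L):
--     counts = {}
--     for u in U:
--         counts[u] = counts.get(u, 0) + 1
--     cache = {}
--     result = 0
--     for m in M:
--         for u, c in counts.items():
--             t = 2 * m - u
--             if t not in cache:
--                 cache[t] = found(L, t, 0, len(L) - 1)
--             if cache[t]:
--                 result += c
--     return result
--
-- def found(L, t, lo, hi):
--     if lo > hi:
--         return False
--     mid = (lo + hi) // 2
--     if L[mid] == t:
--         return True
--     if L[mid] < t:
--         return found(L, t, mid + 1, hi)
--     return found(L, t, lo, mid - 1)
-- ===== Notes on version B (the rewrite author's own statement) =====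
-- stated objective: faster
-- what changed: Instead of an iterative binary search run afresh for every (u,m) pair, B builds a frequency table of U once, iterates M against the distinct values of U adding multiplicities, and memoizes a recursive binary search per distinct target, so the number of searches drops from |U|*|M| to one per distinct target 2*m-u.
import Mathlib
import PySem

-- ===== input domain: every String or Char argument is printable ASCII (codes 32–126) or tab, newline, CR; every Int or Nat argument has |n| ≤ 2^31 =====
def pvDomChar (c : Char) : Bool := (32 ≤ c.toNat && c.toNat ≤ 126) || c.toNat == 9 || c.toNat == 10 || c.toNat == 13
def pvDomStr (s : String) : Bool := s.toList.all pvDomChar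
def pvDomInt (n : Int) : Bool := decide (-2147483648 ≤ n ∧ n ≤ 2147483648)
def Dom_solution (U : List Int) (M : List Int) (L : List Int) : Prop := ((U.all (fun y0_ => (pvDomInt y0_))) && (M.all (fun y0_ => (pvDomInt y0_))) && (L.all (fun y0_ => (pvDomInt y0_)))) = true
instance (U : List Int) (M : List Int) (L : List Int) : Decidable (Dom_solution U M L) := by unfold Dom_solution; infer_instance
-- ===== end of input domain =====

-- B restructures A's counting: a frequency table of U, iteration of M against U's distinct
-- values, and a memo cache of one recursive binary search per distinct target; proved equal
-- to A on every input.


-- ===== PORT A =====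
-- is_target: the while loop becomes structural recursion on a fuel that starts at the
-- interval length (end - start + 1 and never less; the fuel-0 branch is unreachable there
-- since the searched interval shrinks by at least one per iteration). L[mid] is ported as
-- pyGetD L mid 0 — whenever it is evaluated, 0 ≤ start ≤ mid ≤ end < len L, so the
-- default is never read and it equals Python's L[mid].
def isTargetGo (target : Int) (L : List Int) (fuel : Nat) (start end_ : Int) : Bool :=
  match fuel with
  | 0 => false
  | fuel + 1 =>
    if start ≤ end_ then
      let mid := PySem.Int.floordiv (start + end_) 2
      if PySem.List.pyGetD L mid 0 = target then true
      else if PySem.List.pyGetD L mid 0 < target then isTargetGo target L fuel (mid + 1) end_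
      else isTargetGo target L fuel start (mid - 1)
    else false

def isTarget (target : Int) (L : List Int) (start : Int) (end_ : Int) : Bool :=
  isTargetGo target L (end_ + 1 - start).toNat start end_

def solution (U : List Int) (M : List Int) (L : List Int) : Int :=
  U.foldl (fun result value1 =>
    M.foldl (fun result value2 =>
      let k := value1 - value2
      let target := value2 - k
      if isTarget target L 0 (PySem.List.len L - 1) then result + 1 else result)
      result) 0

-- ===== PORT B =====
-- found of Source B: the Python recursion becomes the same recursion on a fuel bounding the
-- interval length (the fuel-0 branch is unreachable, the interval shrinks each call);
-- L[mid] is in range whenever read, as in port A.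
def foundGo (L : List Int) (t : Int) (fuel : Nat) (lo hi : Int) : Bool :=
  match fuel with
  | 0 => false
  | fuel + 1 =>
    if lo > hi then false
    else
      let mid := PySem.Int.floordiv (lo + hi) 2
      if PySem.List.pyGetD L mid 0 = t then true
      else if PySem.List.pyGetD L mid 0 < t then foundGo L t fuel (mid + 1) hi
      else foundGo L t fuel lo (mid - 1)

def found (L : List Int) (t : Int) (lo hi : Int) : Bool :=
  foundGo L t (hi + 1 - lo).toNat lo hi

def solution_alt (U : List Int) (M : List Int) (L : List Int) : Int :=
  let counts := U.foldl (fun d u => d.insert u (d.getD u 0 + 1)) PySem.Dict.empty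
  let final := M.foldl (fun (st : PySem.Dict Int Bool × Int) m =>
    counts.items.foldl (fun (st : PySem.Dict Int Bool × Int) p =>
      let t := 2 * m - p.1
      let cache := if st.1.contains t then st.1
                   else st.1.insert t (found L t 0 (PySem.List.len L - 1))
      if cache.getD t false then (cache, st.2 + p.2) else (cache, st.2))
      st) (PySem.Dict.empty, 0)
  final.2

-- ===== PRECONDITION & SPEC =====
def Spec_solution (U : List Int) (M : List Int) (L : List Int) (out : Int) : Prop := out = solution_alt U M L
instance (U : List Int) (M : List Int) (L : List Int) (out : Int) : Decidable (Spec_solution U M L out) := by unfold Spec_solution; infer_instance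

-- ===== CLAIM (what is proved, stated in full; the proofs are below) =====
def Claim_equal_solution : Prop := ∀ (U : List Int) (M : List Int) (L : List Int), Dom_solution U M L → Spec_solution U M L (solution U M L)

-- ===== LEMMAS AND PROOFS =====

-- B's recursive search and A's while-loop search are the same index recursion
lemma foundGo_eq_isTargetGo (L : List Int) (t : Int) :
    ∀ (fuel : Nat) (lo hi : Int), foundGo L t fuel lo hi = isTargetGo t L fuel lo hi := by
  intro fuel
  induction fuel with
  | zero => intro lo hi; rfl
  | succ fuel ih =>
    intro lo hi
    rw [foundGo, isTargetGo]
    by_cases h : lo ≤ hi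
    · rw [if_neg (by omega : ¬ lo > hi), if_pos h]
      simp only [ih]
    · rw [if_pos (by omega : lo > hi), if_neg h]

-- threading the memo cache: as long as every cache entry is a correct search result, the
-- accumulated count does not depend on the cache
lemma inner_memo (F : Int → Bool) (m : Int) :
    ∀ (items : List (Int × Int)) (cache : PySem.Dict Int Bool) (r : Int),
      (∀ t b, cache.get? t = some b → b = F t) →
      (items.foldl (fun (st : PySem.Dict Int Bool × Int) p =>
        let t := 2 * m - p.1
        let cache := if st.1.contains t then st.1 else st.1.insert t (F t)
        if cache.getD t false then (cache, st.2 + p.2) else (cache, st.2)) (cache, r)).2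
        = r + (items.map (fun p => if F (2 * m - p.1) then p.2 else 0)).sum
      ∧ (∀ t b, ((items.foldl (fun (st : PySem.Dict Int Bool × Int) p =>
        let t := 2 * m - p.1
        let cache := if st.1.contains t then st.1 else st.1.insert t (F t)
        if cache.getD t false then (cache, st.2 + p.2) else (cache, st.2)) (cache, r)).1).get? t = some b → b = F t) := by
  intro items
  induction items with
  | nil => intro cache r hinv; exact ⟨by simp, hinv⟩
  | cons p items ihp =>
    intro cache r hinv
    simp only [List.foldl_cons, List.map_cons, List.sum_cons]
    set t0 := 2 * m - p.1 with ht0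
    have hstep : ∀ cache' : PySem.Dict Int Bool,
        cache' = (if cache.contains t0 then cache else cache.insert t0 (F t0)) →
        (∀ t b, cache'.get? t = some b → b = F t) ∧ cache'.getD t0 false = F t0 := by
      intro cache' hc
      by_cases hct : cache.contains t0
      · rw [if_pos hct] at hc
        subst hc
        refine ⟨hinv, ?_⟩
        have hsome : (PySem.Dict.get? cache' t0).isSome := by
          rw [← PySem.Dict.contains_eq_isSome_get?]; exact hct
        rcases Option.isSome_iff_exists.mp hsome with ⟨b, hb⟩
        rw [PySem.Dict.getD_eq_get?_getD, hb]
        exact hinv t0 b hb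
      · rw [if_neg hct] at hc
        subst hc
        constructor
        · intro t b hget
          rw [PySem.Dict.get?_insert] at hget
          split at hget
          · rename_i hteq; cases hget; subst hteq; rfl
          · exact hinv t b hget
        · rw [PySem.Dict.getD_insert_self]
    rcases hstep _ rfl with ⟨hinv', hval⟩
    by_cases hF : F t0 = true
    · rw [show (if (if cache.contains t0 then cache else cache.insert t0 (F t0)).getD t0 false
          then ((if cache.contains t0 then cache else cache.insert t0 (F t0)), r + p.2)
          else ((if cache.contains t0 then cache else cache.insert t0 (F t0)), r))
        = ((if cache.contains t0 then cache else cache.insert t0 (F t0)), r + p.2) by rw [hval, hF]; simp]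
      rcases ihp _ (r + p.2) hinv' with ⟨hv, hi⟩
      refine ⟨?_, hi⟩
      rw [hv]
      simp only [hF, if_true]
      ring
    · have hF' : F t0 = false := by cases h : F t0; rfl; exact absurd h hF
      rw [show (if (if cache.contains t0 then cache else cache.insert t0 (F t0)).getD t0 false
          then ((if cache.contains t0 then cache else cache.insert t0 (F t0)), r + p.2)
          else ((if cache.contains t0 then cache else cache.insert t0 (F t0)), r))
        = ((if cache.contains t0 then cache else cache.insert t0 (F t0)), r) by rw [hval, hF']; simp]
      rcases ihp _ r hinv' with ⟨hv, hi⟩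
      refine ⟨?_, hi⟩
      rw [hv]
      simp only [hF', Bool.false_eq_true, if_false]
      ring

-- the outer loop over M, with the cache carried across iterations
lemma outer_memo (F : Int → Bool) (items : List (Int × Int)) :
    ∀ (Ms : List Int) (cache : PySem.Dict Int Bool) (r : Int),
      (∀ t b, cache.get? t = some b → b = F t) →
      (Ms.foldl (fun (st : PySem.Dict Int Bool × Int) m =>
        items.foldl (fun (st : PySem.Dict Int Bool × Int) p =>
          let t := 2 * m - p.1
          let cache := if st.1.contains t then st.1 else st.1.insert t (F t)
          if cache.getD t false then (cache, st.2 + p.2) else (cache, st.2)) st) (cache, r)).2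
      = r + (Ms.map (fun m => (items.map (fun p => if F (2 * m - p.1) then p.2 else 0)).sum)).sum := by
  intro Ms
  induction Ms with
  | nil => intro cache r _; simp
  | cons m Ms ihm =>
    intro cache r hinv
    simp only [List.foldl_cons, List.map_cons, List.sum_cons]
    rcases inner_memo F m items cache r hinv with ⟨hv, hi⟩
    have hpair : (items.foldl (fun (st : PySem.Dict Int Bool × Int) p =>
        let t := 2 * m - p.1
        let cache := if st.1.contains t then st.1 else st.1.insert t (F t)
        if cache.getD t false then (cache, st.2 + p.2) else (cache, st.2)) (cache, r))
      = ((items.foldl (fun (st : PySem.Dict Int Bool × Int) p =>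
        let t := 2 * m - p.1
        let cache := if st.1.contains t then st.1 else st.1.insert t (F t)
        if cache.getD t false then (cache, st.2 + p.2) else (cache, st.2)) (cache, r)).1,
         r + (items.map (fun p => if F (2 * m - p.1) then p.2 else 0)).sum) := by
      rw [← hv]
    rw [hpair, ihm _ _ hi]
    ring

-- countP with a disjunctive membership test splits off the head of the test list
lemma countP_split (f : Int → Bool) (u : Int) (S' : List Int) (hu : u ∉ S') :
    ∀ xs : List Int,
      xs.countP (fun x => f x && (decide (x = u) || decide (x ∈ S'))) =
      (if f u then xs.count u else 0) + xs.countP (fun x => f x && decide (x ∈ S')) := by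
  intro xs
  induction xs with
  | nil => simp
  | cons x xs ihx =>
    simp only [List.countP_cons, List.count_cons, ihx]
    by_cases hx : x = u
    · subst hx
      have : x ∉ S' := hu
      by_cases hf : f x
      · simp [hf, this]; omega
      · simp [hf, this]
    · by_cases hm : x ∈ S'
      · by_cases hf : f x
        · simp [hx, hm, hf]; omega
        · simp [hx, hm, hf]
      · by_cases hf : f x
        · simp [hx, hm, hf]
        · simp [hx, hm, hf]

-- summing multiplicities over a dedup list is counting the original list
lemma sum_over_nodup (f : Int → Bool) (xs : List Int) :
    ∀ S : List Int, S.Nodup →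
      (S.map (fun u => if f u then (xs.count u : Int) else 0)).sum =
      (xs.countP (fun x => f x && decide (x ∈ S)) : Int) := by
  intro S
  induction S with
  | nil => simp
  | cons u S' ihS =>
    intro hnd
    rcases List.nodup_cons.mp hnd with ⟨hu, hnd'⟩
    have hsplit := countP_split f u S' hu xs
    have hcong : xs.countP (fun x => f x && decide (x ∈ u :: S')) =
        xs.countP (fun x => f x && (decide (x = u) || decide (x ∈ S'))) := by
      apply List.countP_congr
      intro x _
      simp [List.mem_cons]
    simp only [List.map_cons, List.sum_cons, ihS hnd', hcong, hsplit]
    push_cast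
    ring

-- swapping a double list sum
lemma sum_swap (f : Int → Int → Int) (as bs : List Int) :
    (as.map (fun a => ((bs.map (fun b => f a b)).sum))).sum =
    (bs.map (fun b => ((as.map (fun a => f a b)).sum))).sum := by
  induction as with
  | nil => simp
  | cons a as iha =>
    simp only [List.map_cons, List.sum_cons, iha]
    rw [← PySem.List.sum_map_add_int]

-- ===== VERDICT (by name: the statement is the Claim_ definition above) =====
theorem solution_spec : Claim_equal_solution := by
  intro U M L _
  unfold Spec_solution
  -- the common membership test
  have hbridge : ∀ t : Int, isTarget t L 0 (PySem.List.len L - 1) =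
      found L t 0 (PySem.List.len L - 1) := by
    intro t
    rw [isTarget, found, foundGo_eq_isTargetGo]
  -- A as a double sum
  have hA : solution U M L =
      (U.map (fun u => ((M.map (fun m =>
        if found L (2 * m - u) 0 (PySem.List.len L - 1)
        then (1 : Int) else 0)).sum))).sum := by
    unfold solution
    rw [PySem.List.foldl_congr_mem U _
      (fun result value1 => result + ((M.countP (fun value2 =>
        found L (2 * value2 - value1) 0 (PySem.List.len L - 1))) : Int))
      0 ?_]
    · rw [PySem.List.foldl_add, zero_add]
      refine congrArg List.sum ?_
      apply List.map_congr_left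
      intro u _
      rw [← PySem.List.sum_map_ite_one_zero]
    · intro acc value1 _
      rw [PySem.List.foldl_congr_mem M _
        (fun result value2 => if found L (2 * value2 - value1) 0 (PySem.List.len L - 1) = true
          then result + 1 else result) acc ?_]
      · rw [PySem.List.foldl_count_if]
      · intro acc2 value2 _
        simp only
        have harg : value2 - (value1 - value2) = 2 * value2 - value1 := by ring
        rw [harg, hbridge (2 * value2 - value1)]
  -- B: eliminate the memo cache, then read off the double sum over M and the dedup of U
  have hB : solution_alt U M L =
      (M.map (fun m => (((PySem.Set.ofList U).map (fun u =>
        if found L (2 * m - u) 0 (PySem.List.len L - 1)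
        then (U.count u : Int) else 0)).sum))).sum := by
    unfold solution_alt
    simp only [PySem.Dict.foldl_insert_getD_add_one_eq_counter]
    rw [outer_memo (fun t => found L t 0 (PySem.List.len L - 1)) _ M PySem.Dict.empty 0
      (by intro t b h; rw [PySem.Dict.get?_empty] at h; cases h)]
    rw [zero_add]
    refine congrArg List.sum ?_
    apply List.map_congr_left
    intro m _
    rw [PySem.Dict.items_counter, List.map_map]
    rfl
  rw [hA, hB, sum_swap]
  refine congrArg List.sum ?_
  apply List.map_congr_left
  intro m _
  rw [sum_over_nodup _ U (PySem.Set.ofList U) (PySem.Set.nodup_ofList U)]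
  rw [PySem.List.sum_map_ite_one_zero]
  congr 1
  apply List.countP_congr
  intro u hu
  simp [PySem.Set.mem_ofList, hu]
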